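-- pv_equiv track=rewrite | github.com/griffs37/CA_318 | python/8163.sol.py | make_adjacency_matrix
-- ===== SOURCE A (Python) =====
-- def make_adjacency_matrix(edge_list):
-- 	adjacency_matrix = []
-- 	num = 0
-- 	pass
-- 	for lists in edge_list:
-- 		for item in lists:
-- 			if ord(item) > num:
-- 				if (ord(item)-64) > num:
-- 					num = ord(item)-64
--
-- 	for lists in edge_list:
-- 		adjacency = []
-- 		i = 1
-- 		for i in range(num):
-- 			letter = chr(ord("A") + i)
-- 			if letter in lists:
-- 				adjacency.append(1)
-- 			else:
-- 			    adjacency.append(0)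
-- 		adjacency_matrix.append(adjacency)
-- 	return adjacency_matrix
-- ===== SOURCE B (Python) =====
-- def make_adjacency_matrix(edge_list):
--     num = 0
--     for row in edge_list:
--         for c in row:
--             v = ord(c) - 64
--             if v > num:
--                 num = v
--     adjacency_matrix = []
--     for row in edge_list:
--         vec = [0] * num
--         for c in row:
--             j = ord(c) - 65
--             if 0 <= j < num:
--                 vec[j] = 1
--         adjacency_matrix.append(vec)
--     return adjacency_matrix
-- ===== Notes on version B (the rewrite author's own statement) =====
-- stated objective: alternative
-- what changed: The inner per-row loop is flipped from gather (iterate over the num columns and test 'chr(65+i) in row' membership, a scan of the row per column) to scatter (allocate a zero vector once and set index ord(c)-65 for each character of the row).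
import Mathlib
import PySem

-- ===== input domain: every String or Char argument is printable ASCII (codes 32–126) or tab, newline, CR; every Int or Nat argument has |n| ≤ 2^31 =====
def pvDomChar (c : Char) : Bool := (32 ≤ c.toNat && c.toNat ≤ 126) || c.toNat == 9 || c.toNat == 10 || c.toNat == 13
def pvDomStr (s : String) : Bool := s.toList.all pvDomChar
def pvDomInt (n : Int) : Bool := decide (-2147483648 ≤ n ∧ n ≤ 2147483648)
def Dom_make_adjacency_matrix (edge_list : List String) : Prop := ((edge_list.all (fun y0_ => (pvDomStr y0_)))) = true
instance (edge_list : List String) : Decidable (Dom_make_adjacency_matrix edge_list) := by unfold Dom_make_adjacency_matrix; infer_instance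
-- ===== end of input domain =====

-- B replaces A's per-row gather loop (for each of the num columns, scan the row for chr(65+i))
-- by a scatter loop (allocate a zero row once, set index ord(c)-65 for each character): alternative traversal.

-- ===== PORT A =====
-- first pass of A: num = running maximum of ord(item)-64, with A's nested ifs kept
def mamA_num (edge_list : List String) : Int :=
  edge_list.foldl (fun num lists =>
    lists.toList.foldl (fun num item =>
      if (item.toNat : Int) > num then
        if (item.toNat : Int) - 64 > num then (item.toNat : Int) - 64 else num
      else num) num) 0

-- one row of A: for i in range(num), append 1 if chr(65+i) in lists else 0.
-- chr(65+i) is ported by hand as Char.ofNat (65+i).toNat: exact here since 0 ≤ i and on Dom 65+i ≤ 126.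
def mamA_row (num : Int) (lists : String) : List Int :=
  (PySem.List.pyRange 0 num 1).foldl (fun adjacency i =>
    if PySem.Str.isIn (String.ofList [Char.ofNat (65 + i).toNat]) lists then adjacency ++ [(1 : Int)]
    else adjacency ++ [(0 : Int)]) []

def make_adjacency_matrix (edge_list : List String) : List (List Int) :=
  let num := mamA_num edge_list
  edge_list.foldl (fun adjacency_matrix lists => adjacency_matrix ++ [mamA_row num lists]) []

-- ===== PORT B =====
-- first pass of B: num = running maximum of ord(c)-64 (single guard)
def mamB_num (edge_list : List String) : Int :=
  edge_list.foldl (fun num row =>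
    row.toList.foldl (fun num c =>
      if (c.toNat : Int) - 64 > num then (c.toNat : Int) - 64 else num) num) 0

-- one row of B: vec = [0]*num; for c in row: j = ord(c)-65; if 0 <= j < num: vec[j] = 1
def mamB_row (num : Int) (row : String) : List Int :=
  row.toList.foldl (fun vec c =>
    if 0 ≤ (c.toNat : Int) - 65 ∧ (c.toNat : Int) - 65 < num then
      vec.set ((c.toNat : Int) - 65).toNat 1
    else vec) (List.replicate num.toNat 0)

def make_adjacency_matrix_alt (edge_list : List String) : List (List Int) :=
  let num := mamB_num edge_list
  edge_list.foldl (fun adjacency_matrix row => adjacency_matrix ++ [mamB_row num row]) []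

-- ===== PRECONDITION & SPEC =====
def Spec_make_adjacency_matrix (edge_list : List String) (out : List (List Int)) : Prop := out = make_adjacency_matrix_alt edge_list
instance (edge_list : List String) (out : List (List Int)) : Decidable (Spec_make_adjacency_matrix edge_list out) := by unfold Spec_make_adjacency_matrix; infer_instance

-- ===== CLAIM (what is proved, stated in full; the proofs are below) =====
def Claim_equal_make_adjacency_matrix : Prop := ∀ (edge_list : List String), Dom_make_adjacency_matrix edge_list → Spec_make_adjacency_matrix edge_list (make_adjacency_matrix edge_list)

-- ===== LEMMAS AND PROOFS =====

-- A's two nested ifs compute the same step as B's single guard, so the two num passes agree.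
lemma num_eq (edge_list : List String) : mamA_num edge_list = mamB_num edge_list := by
  unfold mamA_num mamB_num
  congr 1
  funext num lists
  congr 1
  funext n c
  split_ifs <;> omega

-- bounds of B's num pass on the domain (all character codes ≤ 126)
lemma innerB_bounds (s : List Char) (hs : ∀ c ∈ s, c.toNat ≤ 126) (n : Int) (h0 : 0 ≤ n) (h62 : n ≤ 62) :
    0 ≤ s.foldl (fun num c => if (c.toNat : Int) - 64 > num then (c.toNat : Int) - 64 else num) n ∧
    s.foldl (fun num c => if (c.toNat : Int) - 64 > num then (c.toNat : Int) - 64 else num) n ≤ 62 := by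
  induction s generalizing n with
  | nil => exact ⟨h0, h62⟩
  | cons c s ih =>
    simp only [List.foldl_cons]
    have hc := hs c (by simp)
    refine ih (fun d hd => hs d (by simp [hd])) _ ?_ ?_ <;> split_ifs <;> omega

lemma outerB_bounds (t : List String) (ht : ∀ s ∈ t, ∀ c ∈ s.toList, c.toNat ≤ 126)
    (n : Int) (h0 : 0 ≤ n) (h62 : n ≤ 62) :
    0 ≤ t.foldl (fun num row => row.toList.foldl (fun num c => if (c.toNat : Int) - 64 > num then (c.toNat : Int) - 64 else num) num) n ∧
    t.foldl (fun num row => row.toList.foldl (fun num c => if (c.toNat : Int) - 64 > num then (c.toNat : Int) - 64 else num) num) n ≤ 62 := by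
  induction t generalizing n with
  | nil => exact ⟨h0, h62⟩
  | cons s t ih =>
    simp only [List.foldl_cons]
    obtain ⟨h0', h62'⟩ := innerB_bounds s.toList (ht s (by simp)) n h0 h62
    exact ih (fun d hd => ht d (by simp [hd])) _ h0' h62'

lemma numB_bounds (edge_list : List String) (hd : Dom_make_adjacency_matrix edge_list) :
    0 ≤ mamB_num edge_list ∧ mamB_num edge_list ≤ 62 := by
  unfold Dom_make_adjacency_matrix at hd
  simp only [List.all_eq_true, pvDomStr, pvDomChar, Bool.or_eq_true, Bool.and_eq_true,
    decide_eq_true_eq, beq_iff_eq] at hd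
  refine outerB_bounds edge_list (fun s hs c hc => ?_) 0 (le_refl 0) (by norm_num)
  have := hd s hs c hc
  omega

lemma mem_iff_exists (s : List Char) (k : Nat) (hk : 65 + k ≤ 126) :
    (Char.ofNat (65 + k) ∈ s) ↔ ∃ c ∈ s, c.toNat = 65 + k := by
  constructor
  · intro h
    refine ⟨_, h, ?_⟩
    have hv : (65 + k).isValidChar := Or.inl (by omega)
    simp [Char.toNat_ofNat, hv]
  · rintro ⟨c, hc, he⟩
    have : Char.ofNat (65 + k) = c := by rw [← he, Char.ofNat_toNat]
    rwa [this]

-- membership test of A ("letter in lists" with a one-character letter) is char membership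
lemma isIn_singleton (a : Char) (s : String) (x y : Int) :
    (if PySem.Str.isIn (String.ofList [a]) s then x else y) = (if a ∈ s.toList then x else y) := by
  by_cases h : a ∈ s.toList
  · rw [if_pos h, if_pos]
    exact (PySem.Str.isIn_iff_infix _ _).mpr (by simpa [List.singleton_infix_iff] using h)
  · rw [if_neg h, if_neg]
    intro hc
    exact h (by simpa [List.singleton_infix_iff] using (PySem.Str.isIn_iff_infix _ _).mp hc)

lemma gather_eq (num : Int) (_h0 : 0 ≤ num) (_h62 : num ≤ 62) (s : String) :
    mamA_row num s = (List.range num.toNat).map (fun k => if Char.ofNat (65 + k) ∈ s.toList then (1 : Int) else 0) := by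
  unfold mamA_row
  have hbody : (fun (adjacency : List Int) (i : Int) =>
      if PySem.Str.isIn (String.ofList [Char.ofNat (65 + i).toNat]) s then adjacency ++ [(1 : Int)]
      else adjacency ++ [(0 : Int)])
      = fun adjacency i => adjacency ++ [if PySem.Str.isIn (String.ofList [Char.ofNat (65 + i).toNat]) s then (1 : Int) else 0] := by
    funext a i; split_ifs <;> rfl
  rw [hbody, PySem.List.foldl_append_singleton_eq_map, List.nil_append,
    PySem.List.pyRange_one, List.map_map, Int.sub_zero]
  refine List.map_congr_left (fun k hk => ?_)
  have hk' : k < num.toNat := by simpa using hk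
  have h1 : ((0 : Int) + (k : Int)).toNat = k := by omega
  have h2 : (65 + ((0 : Int) + (k : Int))).toNat = 65 + k := by omega
  simp only [Function.comp, h2]
  rw [isIn_singleton]

lemma scat_len (num : Int) (s : List Char) (acc : List Int) :
    (s.foldl (fun vec c =>
      if 0 ≤ (c.toNat : Int) - 65 ∧ (c.toNat : Int) - 65 < num then
        vec.set ((c.toNat : Int) - 65).toNat 1
      else vec) acc).length = acc.length := by
  induction s generalizing acc with
  | nil => rfl
  | cons c s ih => simp only [List.foldl_cons]; rw [ih]; split_ifs <;> simp

lemma scat_getD (num : Int) (h0 : 0 ≤ num) (s : List Char) (acc : List Int)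
    (hlen : acc.length = num.toNat) (k : Nat) (hk : k < num.toNat) :
    (s.foldl (fun vec c =>
      if 0 ≤ (c.toNat : Int) - 65 ∧ (c.toNat : Int) - 65 < num then
        vec.set ((c.toNat : Int) - 65).toNat 1
      else vec) acc).getD k 0
    = if (∃ c ∈ s, c.toNat = 65 + k) then 1 else acc.getD k 0 := by
  induction s generalizing acc with
  | nil => simp
  | cons c s ih =>
    simp only [List.foldl_cons]
    have hlen' : ((if 0 ≤ (c.toNat : Int) - 65 ∧ (c.toNat : Int) - 65 < num then
        acc.set ((c.toNat : Int) - 65).toNat 1 else acc)).length = num.toNat := by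
      split_ifs <;> simpa using hlen
    rw [ih _ hlen']
    have hkk : k < acc.length := by omega
    have hstep : ((if 0 ≤ (c.toNat : Int) - 65 ∧ (c.toNat : Int) - 65 < num then
        acc.set ((c.toNat : Int) - 65).toNat 1 else acc)).getD k 0
        = if c.toNat = 65 + k then 1 else acc.getD k 0 := by
      by_cases hc : c.toNat = 65 + k
      · have hg : 0 ≤ (c.toNat : Int) - 65 ∧ (c.toNat : Int) - 65 < num := by
          constructor <;> omega
        rw [if_pos hg, if_pos hc]
        have : ((c.toNat : Int) - 65).toNat = k := by omega
        rw [this, List.getD_eq_getElem?_getD, List.getElem?_set_self hkk]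
        rfl
      · rw [if_neg hc]
        split_ifs with hg
        · have hne : ((c.toNat : Int) - 65).toNat ≠ k := by omega
          rw [List.getD_eq_getElem?_getD, List.getElem?_set_ne hne, ← List.getD_eq_getElem?_getD]
        · rfl
    rw [hstep]
    by_cases hc : c.toNat = 65 + k <;> by_cases hs : (∃ c ∈ s, c.toNat = 65 + k) <;>
      simp [List.mem_cons, hc, hs]

lemma scatter_eq (num : Int) (h0 : 0 ≤ num) (h62 : num ≤ 62) (s : String) :
    mamB_row num s = (List.range num.toNat).map (fun k => if Char.ofNat (65 + k) ∈ s.toList then (1 : Int) else 0) := by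
  unfold mamB_row
  have hlen0 : (List.replicate num.toNat (0 : Int)).length = num.toNat := by simp
  apply List.ext_getElem
  · rw [scat_len]; simp
  · intro i h1 h2
    have hi : i < num.toNat := by rw [scat_len] at h1; simpa using h1
    have hL : i < (s.toList.foldl (fun vec c =>
        if 0 ≤ (c.toNat : Int) - 65 ∧ (c.toNat : Int) - 65 < num then
          vec.set ((c.toNat : Int) - 65).toNat 1
        else vec) (List.replicate num.toNat (0 : Int))).length := h1
    rw [← List.getD_eq_getElem _ 0 hL, scat_getD num h0 s.toList _ hlen0 i hi]
    have hrep : (List.replicate num.toNat (0 : Int)).getD i 0 = 0 := by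
      rw [List.getD_eq_getElem _ 0 (by simpa using hi)]; simp
    rw [hrep]
    have hval : 65 + i ≤ 126 := by omega
    rw [List.getElem_map]
    simp only [List.getElem_range]
    simp only [mem_iff_exists s.toList i hval]

lemma row_eq (num : Int) (h0 : 0 ≤ num) (h62 : num ≤ 62) (s : String) :
    mamA_row num s = mamB_row num s := by
  rw [gather_eq num h0 h62 s, scatter_eq num h0 h62 s]

-- ===== VERDICT (by name: the statement is the Claim_ definition above) =====
theorem make_adjacency_matrix_spec : Claim_equal_make_adjacency_matrix := by
  intro el hd
  unfold Spec_make_adjacency_matrix make_adjacency_matrix make_adjacency_matrix_alt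
  simp only [PySem.List.foldl_append_singleton_eq_map, List.nil_append]
  obtain ⟨h0, h62⟩ := numB_bounds el hd
  rw [num_eq]
  exact List.map_congr_left (fun s _ => row_eq _ h0 h62 s)
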